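-- pv_equiv track=rewrite | github.com/eolandro/IAENERO2026 | Tema3/Lima/A3/Boome_Pathfinding.py | buscar_posicion
-- ===== SOURCE A (Python) =====
-- def buscar_posicion(tablero, simbolo):
--     posiciones = []
--
--     for i, fila in enumerate(tablero):
--         for j, celda in enumerate(fila):
--             if celda == simbolo:
--                 posiciones.append((i, j))
--
--     if len(posiciones) == 0:
--         raise ValueError(f"No se encontró el símbolo '{simbolo}' en el tablero.")
--
--     if len(posiciones) > 1:
--         raise ValueError(f"Se encontró más de un símbolo '{simbolo}' en el tablero.")
--
--     return posiciones[0]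
-- ===== SOURCE B (Python) =====
-- def buscar_posicion(tablero, simbolo):
--     total = sum(fila.count(simbolo) for fila in tablero)
--     if total == 0:
--         raise ValueError(f"No se encontró el símbolo '{simbolo}' en el tablero.")
--     if total > 1:
--         raise ValueError(f"Se encontró más de un símbolo '{simbolo}' en el tablero.")
--     for i, fila in enumerate(tablero):
--         if simbolo in fila:
--             return (i, fila.index(simbolo))
-- ===== Notes on version B (the rewrite author's own statement) =====
-- stated objective: alternative
-- what changed: B never builds a positions list: it first validates uniqueness with a counting pass (sum of fila.count), then locates the hit with the builtins 'in' and list.index, instead of A's nested enumerate loops collecting coordinates and checking len().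
import Mathlib
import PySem

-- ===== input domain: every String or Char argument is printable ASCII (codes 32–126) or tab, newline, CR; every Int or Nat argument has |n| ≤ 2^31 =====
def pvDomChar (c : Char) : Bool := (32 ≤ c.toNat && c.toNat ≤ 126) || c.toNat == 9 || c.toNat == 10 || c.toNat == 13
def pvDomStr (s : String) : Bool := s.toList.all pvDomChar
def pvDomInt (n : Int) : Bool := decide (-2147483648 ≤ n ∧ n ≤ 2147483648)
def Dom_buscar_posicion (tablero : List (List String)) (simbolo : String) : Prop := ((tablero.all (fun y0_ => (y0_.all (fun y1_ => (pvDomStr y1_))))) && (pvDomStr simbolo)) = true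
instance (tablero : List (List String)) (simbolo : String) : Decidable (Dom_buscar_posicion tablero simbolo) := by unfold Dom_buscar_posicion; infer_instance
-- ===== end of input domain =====

-- B replaces A's collect-all-coordinates nested scan with staged builtin passes:
-- a counting pass validating uniqueness, then a locate pass ('in' + list.index).

-- ===== PORT A =====
-- A: collect every matching (i, j) into a list, check its length, return posiciones[0].
-- The two 'raise ValueError' branches (len 0, len > 1) are excluded by Pre_; the .getD (0,0)
-- after pyGet? is never reached under Pre_.
def buscar_posicion (tablero : List (List String)) (simbolo : String) : Int × Int :=
  let posiciones : List (Int × Int) :=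
    (PySem.List.enumerate tablero 0).foldl (fun acc p =>
      (PySem.List.enumerate p.2 0).foldl (fun acc2 q =>
        if q.2 == simbolo then acc2 ++ [(p.1, q.1)] else acc2) acc) []
  ((PySem.List.pyGet? posiciones 0).getD (0, 0))

-- ===== PORT B =====
-- B's locate loop: 'for i, fila in enumerate(tablero): if simbolo in fila: return (i, fila.index(simbolo))'.
def pvLocate (simbolo : String) : List (Int × List String) → Option (Int × Int)
  | [] => none
  | p :: rest =>
    if p.2.contains simbolo then some (p.1, ((PySem.List.index? p.2 simbolo).getD 0 : Nat))
    else pvLocate simbolo rest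

-- B: total = sum(fila.count(simbolo) for fila in tablero); the two raise branches
-- (total = 0, total > 1) are outside Pre_ (port returns a junk default there); then locate.
-- Falling off the locate loop (Python returns None) is impossible when total = 1.
def buscar_posicion_alt (tablero : List (List String)) (simbolo : String) : Int × Int :=
  let total : Int := tablero.foldl (fun s fila => s + (PySem.List.count fila simbolo : Int)) 0
  if total = 0 then (0, 0)         -- raise ValueError "No se encontró …" (outside Pre_)
  else if 1 < total then (0, 0)    -- raise ValueError "más de un símbolo …" (outside Pre_)
  else (pvLocate simbolo (PySem.List.enumerate tablero 0)).getD (0, 0)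

-- ===== PRECONDITION & SPEC =====
-- Pre_: the symbol occurs exactly once on the board (A raises ValueError otherwise).
def Pre_buscar_posicion (tablero : List (List String)) (simbolo : String) : Prop :=
  tablero.flatten.count simbolo = 1
instance (tablero : List (List String)) (simbolo : String) : Decidable (Pre_buscar_posicion tablero simbolo) := by unfold Pre_buscar_posicion; infer_instance
def pvWitness_buscar_posicion : List (List String) × String := ([["O", "X"], ["O", "O"]], "X")
def Spec_buscar_posicion (tablero : List (List String)) (simbolo : String) (out : Int × Int) : Prop := out = buscar_posicion_alt tablero simbolo
instance (tablero : List (List String)) (simbolo : String) (out : Int × Int) : Decidable (Spec_buscar_posicion tablero simbolo out) := by unfold Spec_buscar_posicion; infer_instance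

-- ===== CLAIM =====
def Claim_equal_buscar_posicion : Prop := ∀ (tablero : List (List String)) (simbolo : String), Dom_buscar_posicion tablero simbolo → Pre_buscar_posicion tablero simbolo → Spec_buscar_posicion tablero simbolo (buscar_posicion tablero simbolo)

-- ===== LEMMAS AND PROOFS =====
-- The first match in a row, as enumerate-filter sees it, is fila.index(simbolo).
theorem pv_row_head (simbolo : String) :
    ∀ (fila : List String) (j : Int),
      ((PySem.List.enumerate fila j).filter (fun q => q.2 == simbolo)).head?
        = (PySem.List.index? fila simbolo).map (fun (k : Nat) => ((j + (k : Int), simbolo) : Int × String)) := by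
  intro fila
  induction fila with
  | nil => intro j; simp [PySem.List.enumerate, PySem.List.index?_eq_idxOf?]
  | cons c cs ih =>
    intro j
    rw [PySem.List.enumerate_cons]
    by_cases h : (c == simbolo) = true
    · have hc : c = simbolo := eq_of_beq h
      subst hc
      rw [PySem.List.index?_cons_self]
      simp
    · have hne : c ≠ simbolo := fun e => h (by simp [e])
      rw [PySem.List.index?_cons_of_ne cs hne]
      simp only [List.filter_cons, h, Bool.false_eq_true, if_false]
      rw [ih (j + 1), Option.map_map]
      cases PySem.List.index? cs simbolo with
      | none => rfl
      | some k =>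
        simp only [Option.map_some, Function.comp]
        congr 1
        rw [Prod.mk.injEq]
        exact ⟨by push_cast; ring, rfl⟩
  
-- The head of A's flatMap of row matches is exactly B's locate loop.
theorem pv_head_eq_locate (simbolo : String) :
    ∀ (tablero : List (List String)) (s : Int),
      ((PySem.List.enumerate tablero s).flatMap (fun p =>
        ((PySem.List.enumerate p.2 0).filter (fun q => q.2 == simbolo)).map
          (fun q => ((p.1, q.1) : Int × Int)))).head?
      = pvLocate simbolo (PySem.List.enumerate tablero s) := by
  intro tablero
  induction tablero with
  | nil => intro s; rfl
  | cons fila rest ih =>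
    intro s
    rw [PySem.List.enumerate_cons]
    simp only [List.flatMap_cons, pvLocate]
    rw [List.head?_append, List.head?_map, pv_row_head simbolo fila 0]
    by_cases h : fila.contains simbolo = true
    · have hmem : simbolo ∈ fila := by simpa using h
      obtain ⟨k, hk⟩ := Option.isSome_iff_exists.mp
        ((PySem.List.index?_isSome_iff fila simbolo).mpr hmem)
      have hk' : List.idxOf? simbolo fila = some k := by
        rw [← PySem.List.index?_eq_idxOf?]; exact hk
      simp [hmem, hk']
    · have hnm : simbolo ∉ fila := by simpa using h
      have hnone : PySem.List.index? fila simbolo = none :=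
        (PySem.List.index?_eq_none_iff fila simbolo).mpr hnm
      simp only [hnone, Option.map_none, Option.none_or, h, if_false, Bool.false_eq_true]
      exact ih (s + 1)

-- A's positions list in closed form (inner fold = filtered row matches, outer = flatMap).
theorem pv_positions_eq (tablero : List (List String)) (simbolo : String) :
    (PySem.List.enumerate tablero 0).foldl (fun acc p =>
      (PySem.List.enumerate p.2 0).foldl (fun acc2 q =>
        if q.2 == simbolo then acc2 ++ [(p.1, q.1)] else acc2) acc) []
    = (PySem.List.enumerate tablero 0).flatMap (fun p =>
        ((PySem.List.enumerate p.2 0).filter (fun q => q.2 == simbolo)).map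
          (fun q => ((p.1, q.1) : Int × Int))) := by
  have h : ∀ (acc : List (Int × Int)) (p : Int × List String),
      (PySem.List.enumerate p.2 0).foldl (fun acc2 q =>
        if q.2 == simbolo then acc2 ++ [(p.1, q.1)] else acc2) acc
      = acc ++ ((PySem.List.enumerate p.2 0).filter (fun q => q.2 == simbolo)).map
          (fun q => ((p.1, q.1) : Int × Int)) := by
    intro acc p
    exact PySem.List.foldl_append_if _ _ _ _
  calc (PySem.List.enumerate tablero 0).foldl _ []
      = (PySem.List.enumerate tablero 0).foldl (fun acc p =>
          acc ++ ((PySem.List.enumerate p.2 0).filter (fun q => q.2 == simbolo)).map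
            (fun q => ((p.1, q.1) : Int × Int))) [] := by
        exact PySem.List.foldl_congr_mem _ _ _ _ (fun acc p _ => h acc p)
    _ = _ := by rw [PySem.List.foldl_append_eq_flatMap]; rfl

-- B's counting pass computes the flatten count.
theorem pv_total_eq (tablero : List (List String)) (simbolo : String) :
    tablero.foldl (fun s fila => s + (PySem.List.count fila simbolo : Int)) 0
      = (tablero.flatten.count simbolo : Int) := by
  rw [PySem.List.foldl_add]
  simp only [PySem.List.count_eq, List.count_flatten]
  push_cast
  simp [List.map_map, Function.comp_def]

-- ===== VERDICT =====
theorem buscar_posicion_spec : Claim_equal_buscar_posicion := by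
  intro tablero simbolo _ hpre
  unfold Spec_buscar_posicion buscar_posicion buscar_posicion_alt
  unfold Pre_buscar_posicion at hpre
  rw [pv_total_eq, hpre]
  rw [if_neg (by norm_num), if_neg (by norm_num)]
  simp only [pv_positions_eq, PySem.List.pyGet?_zero, ← List.head?_eq_getElem?,
    pv_head_eq_locate]
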